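-- pv_equiv track=rewrite | github.com/seifhassine/REasy | resources/data/dumps/stripped/stripper_propagator.py | own_fields_count_mode
-- ===== SOURCE A (Python) =====
-- from typing import Dict, List, Optional, Set
--
-- Field = Dict
--
-- def ancestors_chain(t: str, parent_map: Dict[str, Optional[str]], existing: Set[str]) -> List[str]:
--     """
--     Return ancestors from root → immediate parent.
--     Stops at None or missing types.
--     """
--     chain: List[str] = []
--     seen: Set[str] = {t}
--     cur = parent_map.get(t)
--     while cur and cur not in seen:
--         if cur not in existing:
--             break
--         chain.append(cur)
--         seen.add(cur)
--         cur = parent_map.get(cur)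
--     chain.reverse()
--     return chain
--
-- def own_fields_count_mode(
--     t: str,
--     idx: Dict[str, Dict],
--     parent_map: Dict[str, Optional[str]],
--     cache: Dict[str, List[Field]],
--     visiting: Set[str],
--     existing_types: Set[str],
-- ) -> List[Field]:
--     if t in cache:
--         return cache[t]
--     if t in visiting:
--         cache[t] = list(idx.get(t, {}).get("fields", []) or [])
--         return cache[t]
--
--     visiting.add(t)
--
--     entry = idx.get(t)
--     if not entry:
--         cache[t] = []
--         visiting.remove(t)
--         return cache[t]
--
--     child_fields: List[Field] = list(entry.get("fields", []) or [])
--     ancs = ancestors_chain(t, parent_map, existing_types)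
--
--     total_anc_own_len = 0
--     for anc in ancs:
--         anc_own = own_fields_count_mode(anc, idx, parent_map, cache, visiting, existing_types)
--         total_anc_own_len += len(anc_own)
--
--     k = len(child_fields) - total_anc_own_len
--     if k < 0:
--         k = 0
--
--     own = child_fields[-k:] if k > 0 else []
--     cache[t] = own
--     visiting.remove(t)
--     return own
-- ===== SOURCE B (Python) =====
-- # B: non-recursive re-implementation. Walks the ancestor chain once (root -> parent),
-- # carrying the running inherited-field count, instead of A's recursion that re-walks
-- # and re-sums every ancestor's own chain.  Return-value equivalence only: like A it
-- # fills `cache` with each processed type's own fields, but it never touches `visiting`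
-- # (A adds and then removes entries, leaving `visiting` unchanged on return).
-- from typing import Dict, List, Optional, Set
--
-- Field = Dict
--
-- def ancestors_chain(t: str, parent_map: Dict[str, Optional[str]], existing: Set[str]) -> List[str]:
--     chain: List[str] = []
--     seen: Set[str] = {t}
--     cur = parent_map.get(t)
--     while cur and cur not in seen:
--         if cur not in existing:
--             break
--         chain.append(cur)
--         seen.add(cur)
--         cur = parent_map.get(cur)
--     chain.reverse()
--     return chain
--
-- def own_fields_count_mode(
--     t: str,
--     idx: Dict[str, Dict],
--     parent_map: Dict[str, Optional[str]],
--     cache: Dict[str, List[Field]],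
--     visiting: Set[str],
--     existing_types: Set[str],
-- ) -> List[Field]:
--     if t in cache:
--         return cache[t]
--     if t in visiting:
--         cache[t] = list(idx.get(t, {}).get("fields", []) or [])
--         return cache[t]
--     entry = idx.get(t)
--     if not entry:
--         cache[t] = []
--         return []
--     total = 0
--     for anc in ancestors_chain(t, parent_map, existing_types):
--         if anc in cache:
--             own = cache[anc]
--         elif anc in visiting:
--             own = list(idx.get(anc, {}).get("fields", []) or [])
--             cache[anc] = own
--         else:
--             e = idx.get(anc)
--             if not e:
--                 own = []
--             else:
--                 own = list(e.get("fields", []) or [])[total:]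
--             cache[anc] = own
--         total += len(own)
--     own = list(entry.get("fields", []) or [])[total:]
--     cache[t] = own
--     return own
-- ===== Notes on version B (the rewrite author's own statement) =====
-- stated objective: alternative
-- what changed: B replaces A's per-ancestor recursion (each ancestor re-walks its own ancestor chain and re-sums every ancestor's field count) by a single non-recursive pass along the chain from root to parent that carries the running inherited-field count, slicing each type's own fields as f[total:].
import Mathlib
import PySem

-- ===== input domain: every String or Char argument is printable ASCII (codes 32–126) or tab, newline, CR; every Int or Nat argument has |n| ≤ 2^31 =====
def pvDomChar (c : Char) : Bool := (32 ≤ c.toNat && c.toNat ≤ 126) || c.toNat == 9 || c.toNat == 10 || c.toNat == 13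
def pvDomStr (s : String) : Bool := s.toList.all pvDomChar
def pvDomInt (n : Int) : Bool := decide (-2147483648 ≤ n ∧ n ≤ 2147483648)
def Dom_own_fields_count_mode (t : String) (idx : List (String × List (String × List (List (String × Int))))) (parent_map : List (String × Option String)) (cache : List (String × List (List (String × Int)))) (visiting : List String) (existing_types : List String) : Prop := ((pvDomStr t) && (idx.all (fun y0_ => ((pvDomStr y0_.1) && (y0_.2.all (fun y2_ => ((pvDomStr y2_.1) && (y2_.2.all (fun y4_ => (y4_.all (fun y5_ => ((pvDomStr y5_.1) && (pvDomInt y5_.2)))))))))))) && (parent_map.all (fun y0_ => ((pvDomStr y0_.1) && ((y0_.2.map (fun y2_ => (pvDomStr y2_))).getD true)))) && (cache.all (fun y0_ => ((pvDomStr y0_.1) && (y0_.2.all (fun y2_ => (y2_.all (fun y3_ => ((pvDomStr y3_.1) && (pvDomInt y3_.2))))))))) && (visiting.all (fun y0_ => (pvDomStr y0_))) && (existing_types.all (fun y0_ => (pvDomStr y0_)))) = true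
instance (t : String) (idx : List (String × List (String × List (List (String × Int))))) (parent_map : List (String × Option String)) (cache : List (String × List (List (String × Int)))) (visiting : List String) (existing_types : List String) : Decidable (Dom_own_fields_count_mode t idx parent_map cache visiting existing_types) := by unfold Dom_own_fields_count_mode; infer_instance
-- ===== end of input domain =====

-- B replaces A's per-ancestor recursion (which re-walks and re-sums every ancestor's chain) by a
-- single pass along the chain carrying the running inherited-field count.  Return-value
-- equivalence only: both Pythons fill `cache` in place; A also temporarily mutates `visiting`
-- (net unchanged on return) while B never touches it.

-- ===== PORT A =====
abbrev pvField := List (String × Int)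
abbrev pvCache := PySem.Dict String (List pvField)

-- parent_map.get(s): a missing key and a stored None both give a non-value, hence the .join
def pvGetParent (pm : List (String × Option String)) (s : String) : Option String :=
  ((PySem.Dict.mk pm).get? s).join

-- entry.get("fields", []) or []   (on a list-valued entry, `or []` is the identity)
def pvFields (entry : List (String × List pvField)) : List pvField :=
  (PySem.Dict.mk entry).getD "fields" []

-- the while-loop of ancestors_chain; fuel pm.length+1 is an upper bound the loop never reaches
-- (each iteration appends a distinct value of parent_map), so this is exact
def pvChainGo (pm : List (String × Option String)) (ex : List String) :
    Nat → List String → List String → Option String → List String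
  | 0, chain, _, _ => chain
  | fuel+1, chain, seen, cur =>
    match cur with
    | none => chain
    | some c =>
      if c = "" then chain                                -- `while cur` : None and "" are falsy
      else if PySem.Set.contains seen c then chain        -- `cur not in seen`
      else if PySem.Set.contains ex c = false then chain  -- `if cur not in existing: break`
      else pvChainGo pm ex fuel (chain ++ [c]) (PySem.Set.add seen c) (pvGetParent pm c)

def ancestorsChain (t : String) (pm : List (String × Option String)) (ex : List String) : List String :=
  (pvChainGo pm ex (pm.length + 1) [] (PySem.Set.add PySem.Set.empty t) (pvGetParent pm t)).reverse

-- A's recursion, threading the mutated cache and visiting; fuel ex.length+3 bounds the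
-- recursion depth (each recursing frame adds a distinct member of existing to visiting),
-- so the guard branch is never taken.  `if not entry` (None or {}) is the getD .. [] = [] test.
-- visiting.remove(t) is ported as Set.discard: t was added above, so no KeyError is possible.
def pvGoA (idx : List (String × List (String × List pvField)))
    (pm : List (String × Option String)) (ex : List String) :
    Nat → String → pvCache → List String → (List pvField × pvCache × List String)
  | 0, _, cache, visiting => ([], cache, visiting)
  | fuel+1, t, cache, visiting =>
    if cache.contains t then (cache.getD t [], cache, visiting)
    else if PySem.Set.contains visiting t then
      let v := pvFields ((PySem.Dict.mk idx).getD t [])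
      (v, cache.insert t v, visiting)
    else
      let visiting := PySem.Set.add visiting t
      let entry := (PySem.Dict.mk idx).getD t []
      if entry = [] then ([], cache.insert t [], PySem.Set.discard visiting t)
      else
        let childFields := pvFields entry
        let st := (ancestorsChain t pm ex).foldl
          (fun (st : Int × pvCache × List String) anc =>
            let r := pvGoA idx pm ex fuel anc st.2.1 st.2.2
            (st.1 + (r.1.length : Int), r.2.1, r.2.2)) (0, cache, visiting)
        let k : Int := (childFields.length : Int) - st.1
        let own := if 0 < k then PySem.List.slice childFields (some (-k)) none else []
        (own, st.2.1.insert t own, PySem.Set.discard st.2.2 t)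

def own_fields_count_mode (t : String) (idx : List (String × List (String × List (List (String × Int))))) (parent_map : List (String × Option String)) (cache : List (String × List (List (String × Int)))) (visiting : List String) (existing_types : List String) : List (List (String × Int)) :=
  (pvGoA idx parent_map existing_types (existing_types.length + 3) t ⟨cache⟩ visiting).1

-- ===== PORT B =====
def own_fields_count_mode_alt (t : String) (idx : List (String × List (String × List (List (String × Int))))) (parent_map : List (String × Option String)) (cache : List (String × List (List (String × Int)))) (visiting : List String) (existing_types : List String) : List (List (String × Int)) :=
  let cacheD : pvCache := ⟨cache⟩
  if cacheD.contains t then cacheD.getD t []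
  else if PySem.Set.contains visiting t then pvFields ((PySem.Dict.mk idx).getD t [])
  else
    let entry := (PySem.Dict.mk idx).getD t []
    if entry = [] then []
    else
      let st := (ancestorsChain t parent_map existing_types).foldl
        (fun (st : Int × pvCache) anc =>
          if st.2.contains anc then (st.1 + ((st.2.getD anc []).length : Int), st.2)
          else if PySem.Set.contains visiting anc then
            let own := pvFields ((PySem.Dict.mk idx).getD anc [])
            (st.1 + (own.length : Int), st.2.insert anc own)
          else
            let e := (PySem.Dict.mk idx).getD anc []
            let own := if e = [] then ([] : List pvField)
                       else PySem.List.slice (pvFields e) (some st.1) none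
            (st.1 + (own.length : Int), st.2.insert anc own))
        ((0 : Int), cacheD)
      PySem.List.slice (pvFields entry) (some st.1) none

-- ===== PRECONDITION & SPEC =====
-- the "effective parent" step the chain walk actually follows: parent exists, truthy, and existing
def pvEff (pm : List (String × Option String)) (ex : List String) (s : String) : Option String :=
  match pvGetParent pm s with
  | none => none
  | some p => if p = "" then none else if PySem.Set.contains ex p then some p else none

def pvEffIter (pm : List (String × Option String)) (ex : List String) : Nat → String → Option String
  | 0, s => some s
  | k+1, s =>
    match pvEff pm ex s with
    | none => none
    | some p => pvEffIter pm ex k p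

-- no parent cycle is reachable from t along effective-parent steps
def pvAcyclicFrom (pm : List (String × Option String)) (ex : List String) (t : String) : Bool :=
  (List.range (pm.length + 1)).all fun j =>
    match pvEffIter pm ex j t with
    | none => true
    | some s => (List.range (pm.length + 1)).all fun k => pvEffIter pm ex (k+1) s != some s

-- Pre_ excludes only inputs where t is not answered directly (cache hit, visiting hit, or missing/
-- empty idx entry) AND the parent chain walked from t runs into a cycle: there A's visiting-set
-- cycle breaking returns a type's full field list as an accidental artefact of the recursion.
def Pre_own_fields_count_mode (t : String) (idx : List (String × List (String × List (List (String × Int))))) (parent_map : List (String × Option String)) (cache : List (String × List (List (String × Int)))) (visiting : List String) (existing_types : List String) : Prop :=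
  (PySem.Dict.mk cache).contains t = true ∨ PySem.Set.contains visiting t = true ∨
  (PySem.Dict.mk idx).getD t [] = [] ∨ pvAcyclicFrom parent_map existing_types t = true
instance (t : String) (idx : List (String × List (String × List (List (String × Int))))) (parent_map : List (String × Option String)) (cache : List (String × List (List (String × Int)))) (visiting : List String) (existing_types : List String) : Decidable (Pre_own_fields_count_mode t idx parent_map cache visiting existing_types) := by unfold Pre_own_fields_count_mode; infer_instance

def pvWitness_own_fields_count_mode : String × (List (String × List (String × List (List (String × Int))))) × (List (String × Option String)) × (List (String × List (List (String × Int)))) × List String × List String :=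
  ("a", [("a", [("fields", [[("x", 1)]])]), ("b", [("fields", [[("x", 1)], [("y", 2)]])])], [("b", some "a")], [], [], ["a", "b"])

def Spec_own_fields_count_mode (t : String) (idx : List (String × List (String × List (List (String × Int))))) (parent_map : List (String × Option String)) (cache : List (String × List (List (String × Int)))) (visiting : List String) (existing_types : List String) (out : List (List (String × Int))) : Prop := out = own_fields_count_mode_alt t idx parent_map cache visiting existing_types
instance (t : String) (idx : List (String × List (String × List (List (String × Int))))) (parent_map : List (String × Option String)) (cache : List (String × List (List (String × Int)))) (visiting : List String) (existing_types : List String) (out : List (List (String × Int))) : Decidable (Spec_own_fields_count_mode t idx parent_map cache visiting existing_types out) := by unfold Spec_own_fields_count_mode; infer_instance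

-- ===== CLAIM (what is proved, stated in full; the proofs are below) =====
def Claim_equal_own_fields_count_mode : Prop := ∀ (t : String) (idx : List (String × List (String × List (List (String × Int))))) (parent_map : List (String × Option String)) (cache : List (String × List (List (String × Int)))) (visiting : List String) (existing_types : List String), Dom_own_fields_count_mode t idx parent_map cache visiting existing_types → Pre_own_fields_count_mode t idx parent_map cache visiting existing_types → Spec_own_fields_count_mode t idx parent_map cache visiting existing_types (own_fields_count_mode t idx parent_map cache visiting existing_types)

-- ===== LEMMAS AND PROOFS =====

def pvStop (ex seen : List String) : Option String → Prop
  | none => True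
  | some c => c = "" ∨ c ∈ seen ∨ ¬ c ∈ ex
def pvLinks (pm : List (String × Option String)) : Option String → List String → Option String → Prop
  | cur, [], cur' => cur' = cur
  | cur, x :: xs, cur' => cur = some x ∧ pvLinks pm (pvGetParent pm x) xs cur'

theorem pvContains_false_of_not_mem {s : List String} {c : String} (h : c ∉ s) :
    PySem.Set.contains s c = false := by
  rw [← Bool.not_eq_true, PySem.Set.contains_iff]; exact h

theorem pvChainGo_stop (pm : List (String × Option String)) (ex : List String)
    (n : Nat) (acc seen : List String) (cur : Option String)
    (h : pvStop ex seen cur) : pvChainGo pm ex (n+1) acc seen cur = acc := by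
  rcases cur with _ | c
  · simp [pvChainGo]
  · simp only [pvChainGo]
    by_cases hc0 : c = ""
    · rw [if_pos hc0]
    · rw [if_neg hc0]
      by_cases hcs : PySem.Set.contains seen c = true
      · rw [if_pos hcs]
      · rw [if_neg hcs]
        have hcex : PySem.Set.contains ex c = false := by
          simp only [pvStop] at h
          rcases h with h | h | h
          · exact absurd h hc0
          · exact absurd ((PySem.Set.contains_iff seen c).mpr h) hcs
          · exact pvContains_false_of_not_mem h
        rw [if_pos hcex]

theorem pvChainGo_step (pm : List (String × Option String)) (ex : List String)
    (n : Nat) (acc seen : List String) (c : String)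
    (hc0 : c ≠ "") (hcs : c ∉ seen) (hce : c ∈ ex) :
    pvChainGo pm ex (n+1) acc seen (some c) =
      pvChainGo pm ex n (acc ++ [c]) (seen ++ [c]) (pvGetParent pm c) := by
  simp only [pvChainGo]
  rw [if_neg hc0, if_neg (by rw [pvContains_false_of_not_mem hcs]; simp),
      if_neg (by rw [(PySem.Set.contains_iff ex c).mpr hce]; simp)]
  have hadd : PySem.Set.add seen c = seen ++ [c] := by simp [PySem.Set.add, hcs]
  rw [hadd]

theorem pvChainGo_spec (pm : List (String × Option String)) (ex : List String) :
    ∀ (fuel : Nat) (seen acc : List String) (cur : Option String), seen.Nodup →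
    ∃ l cur', pvChainGo pm ex fuel acc seen cur = acc ++ l ∧ pvLinks pm cur l cur' ∧
      (∀ x ∈ l, x ∈ ex ∧ x ≠ "") ∧ (seen ++ l).Nodup ∧
      (l.length = fuel ∨ pvStop ex (seen ++ l) cur') := by
  intro fuel
  induction fuel with
  | zero =>
    intro seen acc cur hseen
    exact ⟨[], cur, by simp [pvChainGo], rfl, by simp, by simpa using hseen, Or.inl rfl⟩
  | succ n ih =>
    intro seen acc cur hseen
    rcases cur with _ | c
    · exact ⟨[], none, by simp [pvChainGo], rfl, by simp, by simpa using hseen, Or.inr trivial⟩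
    · by_cases hc0 : c = ""
      · exact ⟨[], some c, by simpa using pvChainGo_stop pm ex n acc seen (some c) (by simp only [pvStop]; exact Or.inl hc0), rfl, by simp,
          by simpa using hseen, Or.inr (by simp only [pvStop, List.append_nil]; exact Or.inl hc0)⟩
      · by_cases hcs : c ∈ seen
        · exact ⟨[], some c, by simpa using pvChainGo_stop pm ex n acc seen (some c) (by simp only [pvStop]; exact Or.inr (Or.inl hcs)), rfl, by simp,
          by simpa using hseen, Or.inr (by simp only [pvStop, List.append_nil]; exact Or.inr (Or.inl hcs))⟩
        · by_cases hce : c ∈ ex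
          · have hseen' : (seen ++ [c]).Nodup := by
              simp only [List.nodup_append, List.nodup_cons, List.nodup_nil, and_true,
                List.not_mem_nil, not_false_iff, true_and]
              exact ⟨hseen, fun a ha b hb => by
                simp only [List.mem_singleton] at hb
                exact fun h => hcs ((hb ▸ h) ▸ ha)⟩
            obtain ⟨l, cur', heq, hlk, hf, hnd, hstop⟩ :=
              ih (seen ++ [c]) (acc ++ [c]) (pvGetParent pm c) hseen'
            refine ⟨c :: l, cur', ?_, ⟨rfl, hlk⟩, ?_, ?_, ?_⟩
            · rw [pvChainGo_step pm ex n acc seen c hc0 hcs hce, heq]; simp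
            · intro x hxm
              rcases List.mem_cons.mp hxm with rfl | hxm
              · exact ⟨hce, hc0⟩
              · exact hf x hxm
            · simpa using hnd
            · rcases hstop with h | h
              · exact Or.inl (by simp [h])
              · refine Or.inr ?_
                rcases cur' with _ | d
                · trivial
                · simp only [pvStop] at h ⊢
                  rcases h with h | h | h
                  · exact Or.inl h
                  · exact Or.inr (Or.inl (by simpa using h))
                  · exact Or.inr (Or.inr h)
          · exact ⟨[], some c, by simpa using pvChainGo_stop pm ex n acc seen (some c) (by simp only [pvStop]; exact Or.inr (Or.inr hce)), rfl,
              by simp, by simpa using hseen, Or.inr (by simp only [pvStop, List.append_nil]; exact Or.inr (Or.inr hce))⟩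

theorem pvChainGo_run (pm : List (String × Option String)) (ex : List String) :
    ∀ (l : List String) (cur cur' : Option String) (acc seen : List String) (fuel : Nat),
    pvLinks pm cur l cur' → (∀ x ∈ l, x ∈ ex ∧ x ≠ "") → (seen ++ l).Nodup →
    pvStop ex (seen ++ l) cur' → l.length < fuel →
    pvChainGo pm ex fuel acc seen cur = acc ++ l := by
  intro l
  induction l with
  | nil =>
    intro cur cur' acc seen fuel hlk hf hnd hstop hfuel
    obtain ⟨f, rfl⟩ : ∃ f, fuel = f + 1 := ⟨fuel - 1, by omega⟩
    cases hlk
    simp only [List.append_nil] at hstop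
    rw [pvChainGo_stop pm ex f acc seen cur hstop]; simp
  | cons x xs ih =>
    intro cur cur' acc seen fuel hlk hf hnd hstop hfuel
    obtain ⟨f, rfl⟩ : ∃ f, fuel = f + 1 := ⟨fuel - 1, by omega⟩
    obtain ⟨rfl, hlk'⟩ := hlk
    have hx := hf x (by simp)
    have hxs : x ∉ seen := by
      rw [List.nodup_append] at hnd
      intro h; exact hnd.2.2 x h x (by simp) rfl
    rw [pvChainGo_step pm ex f acc seen x hx.2 hxs hx.1]
    rw [ih (pvGetParent pm x) cur' (acc ++ [x]) (seen ++ [x]) f hlk'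
      (fun y hy => hf y (by simp [hy]))
      (by simpa using hnd) (by simpa using hstop) (by simp at hfuel ⊢; omega)]
    simp
theorem pvLinks_drop (pm : List (String × Option String)) :
    ∀ (u : List String) (x : String) (v : List String) (cur cur' : Option String),
    pvLinks pm cur (u ++ x :: v) cur' → pvLinks pm (pvGetParent pm x) v cur' := by
  intro u
  induction u with
  | nil => intro x v cur cur' h; exact h.2
  | cons y ys ih => intro x v cur cur' h; exact ih x v _ cur' h.2

theorem pvLinks_sub_vals (pm : List (String × Option String)) :
    ∀ (l : List String) (s : String) (cur' : Option String),
    pvLinks pm (pvGetParent pm s) l cur' → ∀ x ∈ l, x ∈ pm.filterMap Prod.snd := by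
  intro l
  induction l with
  | nil => intro s cur' _ x hx; simp at hx
  | cons y ys ih =>
    intro s cur' h x hx
    obtain ⟨hy, h'⟩ := h
    rcases List.mem_cons.mp hx with rfl | hx
    · have : (PySem.Dict.mk pm).get? s = some (some x) := by
        rcases hg : (PySem.Dict.mk pm).get? s with _ | v
        · simp [pvGetParent, hg] at hy
        · simp [pvGetParent, hg] at hy; rw [hy]
      have hmem : (s, some x) ∈ pm := PySem.Dict.mem_items_of_get?_eq_some _ this
      exact List.mem_filterMap.mpr ⟨(s, some x), hmem, rfl⟩
    · exact ih y cur' h' x hx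

theorem pvNodup_sub_length {l v : List String} (hnd : l.Nodup) (hsub : ∀ x ∈ l, x ∈ v) :
    l.length ≤ v.length := by
  have h1 : l.toFinset.card = l.length := List.toFinset_card_of_nodup hnd
  have h2 : l.toFinset ⊆ v.toFinset := by
    intro x hx
    rw [List.mem_toFinset] at hx ⊢
    exact hsub x hx
  calc l.length = l.toFinset.card := h1.symm
    _ ≤ v.toFinset.card := Finset.card_le_card h2
    _ ≤ v.length := v.toFinset_card_le

theorem pvLinks_length_le (pm : List (String × Option String)) (l : List String) (s : String)
    (cur' : Option String) (h : pvLinks pm (pvGetParent pm s) l cur') (hnd : l.Nodup) :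
    l.length ≤ pm.length := by
  calc l.length ≤ (pm.filterMap Prod.snd).length :=
        pvNodup_sub_length hnd (pvLinks_sub_vals pm l s cur' h)
    _ ≤ pm.length := List.length_filterMap_le _ _

theorem pvChain_spec (pm : List (String × Option String)) (ex : List String) (t : String) :
    ∃ l cur', ancestorsChain t pm ex = l.reverse ∧ pvLinks pm (pvGetParent pm t) l cur' ∧
      (∀ x ∈ l, x ∈ ex ∧ x ≠ "") ∧ (t :: l).Nodup ∧ pvStop ex (t :: l) cur' := by
  have hadd : PySem.Set.add PySem.Set.empty t = [t] := rfl
  obtain ⟨l, cur', heq, hlk, hf, hnd, hstop⟩ :=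
    pvChainGo_spec pm ex (pm.length + 1) [t] [] (pvGetParent pm t) (by simp)
  refine ⟨l, cur', ?_, hlk, hf, by simpa using hnd, ?_⟩
  · rw [ancestorsChain, hadd, heq]; simp
  · rcases hstop with h | h
    · exfalso
      have hl : l.Nodup := (List.nodup_cons.mp (by simpa using hnd)).2
      have := pvLinks_length_le pm l t cur' hlk hl
      omega
    · simpa using h
theorem pvEff_of_parent (pm : List (String × Option String)) (ex : List String)
    {s x : String} (hp : pvGetParent pm s = some x) (hx : x ∈ ex) (hx0 : x ≠ "") :
    pvEff pm ex s = some x := by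
  simp only [pvEff, hp]
  rw [if_neg hx0, if_pos ((PySem.Set.contains_iff ex x).mpr hx)]

theorem pvEffIter_links (pm : List (String × Option String)) (ex : List String) :
    ∀ (l : List String) (s c : String), pvLinks pm (pvGetParent pm s) l (some c) →
    (∀ x ∈ l, x ∈ ex ∧ x ≠ "") → c ∈ ex → c ≠ "" →
    pvEffIter pm ex (l.length + 1) s = some c := by
  intro l
  induction l with
  | nil =>
    intro s c hlk _ hc hc0
    have hp : pvGetParent pm s = some c := hlk.symm
    simp only [List.length_nil, pvEffIter, pvEff_of_parent pm ex hp hc hc0]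
  | cons x xs ih =>
    intro s c hlk hf hc hc0
    obtain ⟨hp, hlk'⟩ := hlk
    have hx := hf x (by simp)
    have : pvEffIter pm ex (xs.length + 1 + 1) s = pvEffIter pm ex (xs.length + 1) x := by
      simp only [pvEffIter, pvEff_of_parent pm ex hp hx.1 hx.2]
    simpa [this] using ih x c hlk' (fun y hy => hf y (by simp [hy])) hc hc0

theorem pvEffIter_reach (pm : List (String × Option String)) (ex : List String) :
    ∀ (u : List String) (s c : String) (v : List String) (cur' : Option String),
    pvLinks pm (pvGetParent pm s) (u ++ c :: v) cur' → (∀ x ∈ u ++ c :: v, x ∈ ex ∧ x ≠ "") →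
    pvEffIter pm ex (u.length + 1) s = some c := by
  intro u
  induction u with
  | nil =>
    intro s c v cur' hlk hf
    have hc := hf c (by simp)
    simp only [List.nil_append] at hlk
    simp only [List.length_nil, pvEffIter, pvEff_of_parent pm ex hlk.1 hc.1 hc.2]
  | cons x xs ih =>
    intro s c v cur' hlk hf
    obtain ⟨hp, hlk'⟩ := hlk
    have hx := hf x (by simp)
    have step : pvEffIter pm ex ((x :: xs).length + 1) s = pvEffIter pm ex (xs.length + 1) x := by
      simp only [List.length_cons, pvEffIter, pvEff_of_parent pm ex hp hx.1 hx.2]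
    rw [step]
    exact ih x c v cur' hlk' (fun y hy => hf y (by simp [hy]))

theorem pvAcyclic_elim (pm : List (String × Option String)) (ex : List String) (t : String)
    (h : pvAcyclicFrom pm ex t = true) :
    ∀ (j k : Nat) (s : String), j ≤ pm.length → k ≤ pm.length →
    pvEffIter pm ex j t = some s → pvEffIter pm ex (k+1) s ≠ some s := by
  intro j k s hj hk hjs
  simp only [pvAcyclicFrom, List.all_eq_true, List.mem_range] at h
  have h1 := h j (by omega)
  rw [hjs] at h1
  simp only [List.all_eq_true, List.mem_range] at h1
  have h2 := h1 k (by omega)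
  simpa using h2
theorem pvChain_prefix (pm : List (String × Option String)) (ex : List String) (t : String)
    (hpre : pvAcyclicFrom pm ex t = true)
    (l : List String) (cur' : Option String)
    (hlk : pvLinks pm (pvGetParent pm t) l cur')
    (hfacts : ∀ x ∈ l, x ∈ ex ∧ x ≠ "") (hnd : (t :: l).Nodup)
    (hstop : pvStop ex (t :: l) cur') :
    ∀ (l1 : List String) (a : String) (l2 : List String), l = l1 ++ a :: l2 →
    ancestorsChain a pm ex = l2.reverse := by
  intro l1 a l2 hdec
  have hlnd : l.Nodup := (List.nodup_cons.mp hnd).2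
  have hlen : l.length ≤ pm.length := pvLinks_length_le pm l t cur' hlk hlnd
  have hlk2 : pvLinks pm (pvGetParent pm a) l2 cur' := pvLinks_drop pm l1 a l2 _ cur' (hdec ▸ hlk)
  have hand : (a :: l2).Nodup := by
    have : (l1 ++ a :: l2).Nodup := hdec ▸ hlnd
    exact (List.nodup_append.mp this).2.1
  have hstop2 : pvStop ex ([a] ++ l2) cur' := by
    rcases hcur : cur' with _ | c
    · trivial
    · subst hcur
      by_cases hc0 : c = ""
      · exact Or.inl hc0
      · by_cases hce : c ∈ ex
        · exfalso
          simp only [pvStop] at hstop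
          rcases hstop with h | h | h
          · exact hc0 h
          · rcases List.mem_cons.mp h with rfl | hcl
            · -- the walk closes back on t itself
              have h1 : pvEffIter pm ex (l.length + 1) c = some c :=
                pvEffIter_links pm ex l c c hlk hfacts hce hc0
              exact pvAcyclic_elim pm ex c hpre 0 l.length c (by omega) hlen rfl h1
            · -- the walk closes back on an element of the chain
              obtain ⟨u, v, huv⟩ := List.append_of_mem hcl
              have hreach : pvEffIter pm ex (u.length + 1) t = some c :=
                pvEffIter_reach pm ex u t c v (some c) (by rw [← huv]; exact hlk)
                  (by rw [← huv]; exact hfacts)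
              have hcyc0 : pvLinks pm (pvGetParent pm c) v (some c) :=
                pvLinks_drop pm u c v _ _ (by rw [← huv]; exact hlk)
              have hcyc : pvEffIter pm ex (v.length + 1) c = some c :=
                pvEffIter_links pm ex v c c hcyc0
                  (fun y hy => hfacts y (by rw [huv]; simp [hy])) hce hc0
              have hul : u.length + 1 + v.length = l.length := by
                rw [huv]; simp; omega
              exact pvAcyclic_elim pm ex t hpre (u.length + 1) v.length c
                (by omega) (by omega) hreach hcyc
          · exact h hce
        · exact Or.inr (Or.inr hce)
  have hrun : pvChainGo pm ex (pm.length + 1) [] [a] (pvGetParent pm a) = [] ++ l2 := by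
    apply pvChainGo_run pm ex l2 (pvGetParent pm a) cur' [] [a]
    · exact hlk2
    · intro y hy; exact hfacts y (by rw [hdec]; simp [hy])
    · simpa using hand
    · simpa using hstop2
    · have : l2.length ≤ l.length := by rw [hdec]; simp; omega
      omega
  have : ancestorsChain a pm ex = (pvChainGo pm ex (pm.length + 1) [] [a] (pvGetParent pm a)).reverse := rfl
  rw [this, hrun]
  simp

theorem pvSet_contains_add_ne {s : List String} {x y : String} (h : y ≠ x) :
    PySem.Set.contains (PySem.Set.add s x) y = PySem.Set.contains s y := by
  by_cases hy : y ∈ s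
  · have h1 : PySem.Set.contains (PySem.Set.add s x) y = true := by
      rw [PySem.Set.contains_iff]; rw [PySem.Set.mem_add]; exact Or.inl hy
    have h2 : PySem.Set.contains s y = true := by rw [PySem.Set.contains_iff]; exact hy
    rw [h1, h2]
  · have h1 : PySem.Set.contains (PySem.Set.add s x) y = false := by
      rw [← Bool.not_eq_true, PySem.Set.contains_iff, PySem.Set.mem_add]
      rintro (h' | h') <;> [exact hy h'; exact h h']
    have h2 : PySem.Set.contains s y = false := by
      rw [← Bool.not_eq_true, PySem.Set.contains_iff]; exact hy
    rw [h1, h2]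

theorem pvSet_discard_add {s : List String} {x : String} (h : PySem.Set.contains s x = false) :
    PySem.Set.discard (PySem.Set.add s x) x = s := by
  have hx : x ∉ s := by rw [← PySem.Set.contains_iff, h]; simp
  have hadd : PySem.Set.add s x = s ++ [x] := by
    simp [PySem.Set.add, hx]
  rw [hadd]
  simp only [PySem.Set.discard, List.filter_append]
  have h1 : List.filter (fun y => !y == x) s = s :=
    List.filter_eq_self.mpr (by intro y hy; simp; rintro rfl; exact hx hy)
  have h2 : List.filter (fun y => !y == x) [x] = [] := by simp
  rw [h1, h2, List.append_nil]

def pvSumLens (cache : pvCache) (P : List String) : Int :=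
  (P.map fun x => ((cache.getD x []).length : Int)).sum

theorem pvSumLens_nonneg (cache : pvCache) (P : List String) : 0 ≤ pvSumLens cache P := by
  apply List.sum_nonneg; intro x hx
  simp only [List.mem_map] at hx
  obtain ⟨y, _, rfl⟩ := hx
  positivity

theorem pvSlice_eq (f : List pvField) (tot : Int) (h : 0 ≤ tot) :
    (if 0 < (f.length : Int) - tot then PySem.List.slice f (some (-((f.length : Int) - tot))) none else []) =
    PySem.List.slice f (some tot) none := by
  rw [PySem.List.slice_from f h]
  split_ifs with hk
  · have hkn : 0 < ((f.length : Int) - tot).toNat := by omega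
    have : (f.length : Int) - tot = (((f.length : Int) - tot).toNat : Int) := by omega
    rw [this, PySem.List.slice_from_neg_natCast f _ hkn]
    congr 1
    omega
  · symm
    rw [List.drop_eq_nil_iff]
    omega

theorem pvInnerA_fold (idx : List (String × List (String × List pvField)))
    (pm : List (String × Option String)) (ex : List String) :
    ∀ (Q : List String) (tot : Int) (cache : pvCache) (w : List String) (f : Nat),
    (∀ x ∈ Q, cache.contains x = true) →
    Q.foldl (fun (st : Int × pvCache × List String) anc =>
        let r := pvGoA idx pm ex (f+1) anc st.2.1 st.2.2
        (st.1 + (r.1.length : Int), r.2.1, r.2.2)) (tot, cache, w)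
      = (tot + pvSumLens cache Q, cache, w) := by
  intro Q
  induction Q with
  | nil => intro tot cache w f _; simp [pvSumLens]
  | cons q qs ih =>
    intro tot cache w f hQ
    have hq : cache.contains q = true := hQ q (by simp)
    have hstep : pvGoA idx pm ex (f+1) q cache w = (cache.getD q [], cache, w) := by
      rw [pvGoA]; rw [if_pos hq]
    simp only [List.foldl_cons, hstep]
    rw [ih (tot + ((cache.getD q []).length : Int)) cache w f (fun x hx => hQ x (by simp [hx]))]
    simp [pvSumLens]
    ring

-- named forms of the two fold bodies (definitionally equal to the lambdas in the ports)
def pvAStep (idx : List (String × List (String × List pvField)))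
    (pm : List (String × Option String)) (ex : List String) (f : Nat) :
    (Int × pvCache × List String) → String → (Int × pvCache × List String) :=
  fun st anc =>
    let r := pvGoA idx pm ex f anc st.2.1 st.2.2
    (st.1 + (r.1.length : Int), r.2.1, r.2.2)

def pvBStep (idx : List (String × List (String × List pvField))) (visiting : List String) :
    (Int × pvCache) → String → (Int × pvCache) :=
  fun st anc =>
    if st.2.contains anc then (st.1 + ((st.2.getD anc []).length : Int), st.2)
    else if PySem.Set.contains visiting anc then
      let own := pvFields ((PySem.Dict.mk idx).getD anc [])
      (st.1 + (own.length : Int), st.2.insert anc own)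
    else
      let e := (PySem.Dict.mk idx).getD anc []
      let own := if e = [] then ([] : List pvField)
                 else PySem.List.slice (pvFields e) (some st.1) none
      (st.1 + (own.length : Int), st.2.insert anc own)

theorem pvSumLens_append_singleton (c : pvCache) (P : List String) (a : String) :
    pvSumLens c (P ++ [a]) = pvSumLens c P + ((c.getD a []).length : Int) := by
  simp [pvSumLens]

theorem pvSumLens_insert_not_mem (c : pvCache) (P : List String) (a : String)
    (v : List pvField) (h : a ∉ P) : pvSumLens (c.insert a v) P = pvSumLens c P := by
  unfold pvSumLens
  congr 1
  apply List.map_congr_left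
  intro x hx
  rw [PySem.Dict.getD_insert]
  have hxa : ¬ x = a := fun heq => h (heq ▸ hx)
  rw [if_neg hxa]

theorem pvLoop_eq (t : String) (idx : List (String × List (String × List pvField)))
    (pm : List (String × Option String)) (visiting ex : List String) (f : Nat)
    (hpre : pvAcyclicFrom pm ex t = true)
    (l : List String) (cur' : Option String)
    (hlk : pvLinks pm (pvGetParent pm t) l cur')
    (hfacts : ∀ x ∈ l, x ∈ ex ∧ x ≠ "") (hnd : (t :: l).Nodup)
    (hstop : pvStop ex (t :: l) cur') :
    ∀ (S P : List String) (tot : Int) (cacheD : pvCache),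
    l.reverse = P ++ S →
    (∀ x ∈ P, cacheD.contains x = true) →
    tot = pvSumLens cacheD P →
    S.foldl (pvAStep idx pm ex ((f+1)+1)) (tot, cacheD, PySem.Set.add visiting t)
      = ((S.foldl (pvBStep idx visiting) (tot, cacheD)).1,
         (S.foldl (pvBStep idx visiting) (tot, cacheD)).2,
         PySem.Set.add visiting t) ∧
    (∀ x ∈ P ++ S, (S.foldl (pvBStep idx visiting) (tot, cacheD)).2.contains x = true) ∧
    (S.foldl (pvBStep idx visiting) (tot, cacheD)).1
      = pvSumLens (S.foldl (pvBStep idx visiting) (tot, cacheD)).2 (P ++ S) := by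
  intro S
  induction S with
  | nil =>
    intro P tot cacheD hdec hP htot
    refine ⟨rfl, ?_, ?_⟩
    · simpa using hP
    · simpa using htot
  | cons anc S' ih =>
    intro P tot cacheD hdec hP htot
    have hancl : anc ∈ l := by
      have h1 : anc ∈ l.reverse := by rw [hdec]; simp
      simpa using h1
    have hanc := hfacts anc hancl
    have htl : t ∉ l := (List.nodup_cons.mp hnd).1
    have hanct : anc ≠ t := fun h => htl (h ▸ hancl)
    have hrevnd : (P ++ anc :: S').Nodup := by
      rw [← hdec]; exact List.nodup_reverse.mpr (List.nodup_cons.mp hnd).2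
    have hancP : anc ∉ P := by
      rw [List.nodup_append] at hrevnd
      intro h; exact hrevnd.2.2 anc h anc (by simp) rfl
    have htot0 : 0 ≤ tot := htot ▸ pvSumLens_nonneg cacheD P
    have hvadd : PySem.Set.contains (PySem.Set.add visiting t) anc
        = PySem.Set.contains visiting anc := pvSet_contains_add_ne hanct
    obtain ⟨own, cache', hA, hB, hcont, hsum⟩ : ∃ (own : List pvField) (cache' : pvCache),
        pvAStep idx pm ex ((f+1)+1) (tot, cacheD, PySem.Set.add visiting t) anc
          = (tot + (own.length : Int), cache', PySem.Set.add visiting t) ∧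
        pvBStep idx visiting (tot, cacheD) anc = (tot + (own.length : Int), cache') ∧
        (∀ x ∈ P ++ [anc], cache'.contains x = true) ∧
        tot + (own.length : Int) = pvSumLens cache' (P ++ [anc]) := by
      by_cases hc : cacheD.contains anc = true
      · refine ⟨cacheD.getD anc [], cacheD, ?_, ?_, ?_, ?_⟩
        · have hgo : pvGoA idx pm ex ((f+1)+1) anc cacheD (PySem.Set.add visiting t)
              = (cacheD.getD anc [], cacheD, PySem.Set.add visiting t) := by
            rw [pvGoA]; rw [if_pos hc]
          simp [pvAStep, hgo]
        · simp only [pvBStep]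
          rw [if_pos hc]
        · intro x hx
          rcases List.mem_append.mp hx with hx | hx
          · exact hP x hx
          · simp only [List.mem_singleton] at hx; exact hx ▸ hc
        · rw [pvSumLens_append_singleton, htot]
      · by_cases hv : PySem.Set.contains visiting anc = true
        · refine ⟨pvFields ((PySem.Dict.mk idx).getD anc []),
            cacheD.insert anc (pvFields ((PySem.Dict.mk idx).getD anc [])), ?_, ?_, ?_, ?_⟩
          · have hgo : pvGoA idx pm ex ((f+1)+1) anc cacheD (PySem.Set.add visiting t)
                = (pvFields ((PySem.Dict.mk idx).getD anc []),
                   cacheD.insert anc (pvFields ((PySem.Dict.mk idx).getD anc [])),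
                   PySem.Set.add visiting t) := by
              rw [pvGoA]; rw [if_neg hc, if_pos (by rw [hvadd]; exact hv)]
            simp [pvAStep, hgo]
          · simp only [pvBStep]
            rw [if_neg hc, if_pos hv]
          · intro x hx
            rw [PySem.Dict.contains_insert]
            rcases List.mem_append.mp hx with hx | hx
            · rw [hP x hx]; simp
            · simp only [List.mem_singleton] at hx; simp [hx]
          · rw [pvSumLens_append_singleton, pvSumLens_insert_not_mem cacheD P anc _ hancP, htot]
            rw [PySem.Dict.getD_insert, if_pos rfl]
        · have hv' : PySem.Set.contains (PySem.Set.add visiting t) anc = false := by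
            rw [hvadd]; simpa using hv
          have hvneg : ¬ PySem.Set.contains (PySem.Set.add visiting t) anc = true := by
            rw [hv']; simp
          have hdisc : PySem.Set.discard
              (PySem.Set.add (PySem.Set.add visiting t) anc) anc = PySem.Set.add visiting t :=
            pvSet_discard_add hv'
          by_cases he : (PySem.Dict.mk idx).getD anc [] = []
          · refine ⟨[], cacheD.insert anc [], ?_, ?_, ?_, ?_⟩
            · have hgo : pvGoA idx pm ex ((f+1)+1) anc cacheD (PySem.Set.add visiting t)
                  = ([], cacheD.insert anc [], PySem.Set.add visiting t) := by
                rw [pvGoA]; rw [if_neg hc, if_neg hvneg]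
                simp only [he, if_true]
                rw [hdisc]
              simp [pvAStep, hgo]
            · simp only [pvBStep]
              rw [if_neg hc, if_neg hv]
              simp only [he, if_true]
            · intro x hx
              rw [PySem.Dict.contains_insert]
              rcases List.mem_append.mp hx with hx | hx
              · rw [hP x hx]; simp
              · simp only [List.mem_singleton] at hx; simp [hx]
            · rw [pvSumLens_append_singleton, pvSumLens_insert_not_mem cacheD P anc _ hancP, htot]
              rw [PySem.Dict.getD_insert, if_pos rfl]
          · -- the genuine compute branch
            have hl2 : l = S'.reverse ++ anc :: P.reverse := by
              have h1 : l = (P ++ anc :: S').reverse := by rw [← hdec]; simp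
              rw [h1]; simp
            have hchain : ancestorsChain anc pm ex = P := by
              have := pvChain_prefix pm ex t hpre l cur' hlk hfacts hnd hstop
                S'.reverse anc P.reverse hl2
              simpa using this
            have hfold := pvInnerA_fold idx pm ex P 0 cacheD
              (PySem.Set.add (PySem.Set.add visiting t) anc) f hP
            have hgo : pvGoA idx pm ex ((f+1)+1) anc cacheD (PySem.Set.add visiting t)
                = (PySem.List.slice (pvFields ((PySem.Dict.mk idx).getD anc [])) (some tot) none,
                   cacheD.insert anc
                     (PySem.List.slice (pvFields ((PySem.Dict.mk idx).getD anc [])) (some tot) none),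
                   PySem.Set.add visiting t) := by
              rw [pvGoA]; rw [if_neg hc, if_neg hvneg]
              have he' : (((PySem.Dict.mk idx).getD anc []) = []) = False := by
                simp only [eq_iff_iff, iff_false]; exact he
              simp only [he', if_false]
              rw [hchain, hfold]
              simp only [zero_add, ← htot]
              rw [pvSlice_eq _ tot htot0, hdisc]
            refine ⟨PySem.List.slice (pvFields ((PySem.Dict.mk idx).getD anc [])) (some tot) none,
              cacheD.insert anc
                (PySem.List.slice (pvFields ((PySem.Dict.mk idx).getD anc [])) (some tot) none),
              ?_, ?_, ?_, ?_⟩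
            · simp [pvAStep, hgo]
            · simp only [pvBStep]
              rw [if_neg hc, if_neg hv, if_neg he]
            · intro x hx
              rw [PySem.Dict.contains_insert]
              rcases List.mem_append.mp hx with hx | hx
              · rw [hP x hx]; simp
              · simp only [List.mem_singleton] at hx; simp [hx]
            · rw [pvSumLens_append_singleton, pvSumLens_insert_not_mem cacheD P anc _ hancP, htot]
              rw [PySem.Dict.getD_insert, if_pos rfl]
    have hdec' : l.reverse = (P ++ [anc]) ++ S' := by rw [hdec]; simp
    obtain ⟨ih1, ih2, ih3⟩ := ih (P ++ [anc]) (tot + (own.length : Int)) cache' hdec' hcont hsum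
    have hPS : P ++ anc :: S' = (P ++ [anc]) ++ S' := by simp
    refine ⟨?_, ?_, ?_⟩
    · rw [List.foldl_cons, List.foldl_cons, hA, hB, ih1]
    · rw [List.foldl_cons, hB, hPS]; exact ih2
    · rw [List.foldl_cons, hB, hPS]; exact ih3
-- ===== VERDICT (by name: the statement is the Claim_ definition above) =====
theorem own_fields_count_mode_spec : Claim_equal_own_fields_count_mode := by
  intro t idx pm cache visiting ex hdom hpre
  unfold Spec_own_fields_count_mode
  unfold own_fields_count_mode own_fields_count_mode_alt
  have h3 : ex.length + 3 = ((ex.length + 1) + 1) + 1 := rfl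
  rw [h3, pvGoA]
  simp only []
  by_cases hc : (PySem.Dict.mk cache).contains t = true
  · simp only [if_pos hc]
  · simp only [if_neg hc]
    by_cases hv : PySem.Set.contains visiting t = true
    · simp only [if_pos hv]
    · simp only [if_neg hv]
      by_cases he : (PySem.Dict.mk idx).getD t [] = []
      · simp only [he, if_true]
      · have he' : (((PySem.Dict.mk idx).getD t []) = []) = False := by
          simp only [eq_iff_iff, iff_false]; exact he
        simp only [he', if_false]
        -- the computing branch: Pre_ now forces acyclicity
        have hacyc : pvAcyclicFrom pm ex t = true := by
          rcases hpre with h | h | h | h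
          · exact absurd h hc
          · exact absurd h hv
          · exact absurd h he
          · exact h
        obtain ⟨l, cur', hch, hlk, hfacts, hnd, hstop⟩ := pvChain_spec pm ex t
        have hAeq : (fun (st : Int × pvCache × List String) anc =>
            let r := pvGoA idx pm ex ((ex.length + 1) + 1) anc st.2.1 st.2.2
            (st.1 + (r.1.length : Int), r.2.1, r.2.2)) = pvAStep idx pm ex ((ex.length + 1) + 1) := rfl
        have hBeq : (fun (st : Int × pvCache) anc =>
            if st.2.contains anc then (st.1 + ((st.2.getD anc []).length : Int), st.2)
            else if PySem.Set.contains visiting anc then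
              let own := pvFields ((PySem.Dict.mk idx).getD anc [])
              (st.1 + (own.length : Int), st.2.insert anc own)
            else
              let e := (PySem.Dict.mk idx).getD anc []
              let own := if e = [] then ([] : List pvField)
                         else PySem.List.slice (pvFields e) (some st.1) none
              (st.1 + (own.length : Int), st.2.insert anc own)) = pvBStep idx visiting := rfl
        rw [hch, hAeq, hBeq]
        obtain ⟨hfoldeq, hcont, hsum⟩ := pvLoop_eq t idx pm visiting ex ex.length hacyc l cur'
          hlk hfacts hnd hstop l.reverse [] 0 ⟨cache⟩ (by simp) (by simp) rfl
        rw [hfoldeq]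
        have hnonneg : 0 ≤ (l.reverse.foldl (pvBStep idx visiting) (0, (⟨cache⟩ : pvCache))).1 := by
          rw [hsum]; exact pvSumLens_nonneg _ _
        simpa using pvSlice_eq (pvFields ((PySem.Dict.mk idx).getD t []))
          (l.reverse.foldl (pvBStep idx visiting) (0, (⟨cache⟩ : pvCache))).1 hnonneg
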